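-- pv_equiv track=rewrite | github.com/Kegyi/polyglot_dev_atlas_ver2 | content/snippets/python/interview_lcci/05/04_closed_number.py | find_closed_numbers
-- ===== SOURCE A (Python) =====
-- def find_closed_numbers(num: int) -> tuple[int, int]:
--     bigger = num
--     smaller = num
--
--     # Next larger: find rightmost '01' and flip to '10'
--     for i in range(1, 32):
--         if (bigger >> (i - 1)) & 1 == 1 and (bigger >> i) & 1 == 0:
--             bigger |= (1 << i)
--             bigger &= ~(1 << (i - 1))
--             break
--
--     # Next smaller: find rightmost '10' and flip to '01'
--     for i in range(1, 32):
--         if (smaller >> (i - 1)) & 1 == 0 and (smaller >> i) & 1 == 1: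
--             smaller &= ~(1 << i)
--             smaller |= (1 << (i - 1))
--             break
--
--     return bigger, smaller
-- ===== SOURCE B (Python) =====
-- def find_closed_numbers(num: int) -> tuple[int, int]:
--     # rightmost '01' pair (bit p set, bit p+1 clear, p in 0..30), isolated as lowest set bit
--     t = num & ~(num >> 1) & 0x7FFFFFFF
--     # rightmost '10' pair (bit p clear, bit p+1 set, p in 0..30)
--     s = ~num & (num >> 1) & 0x7FFFFFFF
--     return num + (t & -t), num - (s & -s)
-- ===== Notes on version B (the rewrite author's own statement) =====
-- stated objective: alternative
-- what changed: Replaces the two per-bit-position scanning loops by closed-form bit manipulation: a mask of all adjacent '01' (resp. '10') bit positions and lowest-set-bit isolation via t & -t, so each result is num plus (resp. minus) the isolated power of two, with no loop.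
import Mathlib
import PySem

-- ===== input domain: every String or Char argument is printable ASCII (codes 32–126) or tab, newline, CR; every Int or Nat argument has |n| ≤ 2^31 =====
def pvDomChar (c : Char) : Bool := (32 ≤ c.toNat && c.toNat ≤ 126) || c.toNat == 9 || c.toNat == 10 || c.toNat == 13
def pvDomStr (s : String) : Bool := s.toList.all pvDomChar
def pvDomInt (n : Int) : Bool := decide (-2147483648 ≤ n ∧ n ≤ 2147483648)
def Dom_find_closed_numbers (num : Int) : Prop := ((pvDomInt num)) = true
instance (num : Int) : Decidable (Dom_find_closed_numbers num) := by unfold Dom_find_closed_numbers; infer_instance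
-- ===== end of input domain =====

-- B replaces A's two bit-position scanning loops by closed-form lowest-set-bit isolation (objective: alternative, constant work instead of a loop).

-- ===== PORT A =====
-- for i in range(1, 32): … break   — scan for the rightmost '01' pair, flip it to '10'
def pvLoopUp (b : Int) : List Nat → Int
  | [] => b
  | i :: rest =>
    if PySem.Int.band (b >>> (i - 1)) 1 = 1 ∧ PySem.Int.band (b >>> i) 1 = 0 then
      PySem.Int.band (PySem.Int.bor b ((1 : Int) <<< i)) (Int.not ((1 : Int) <<< (i - 1)))
    else pvLoopUp b rest

-- for i in range(1, 32): … break   — scan for the rightmost '10' pair, flip it to '01'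
def pvLoopDown (b : Int) : List Nat → Int
  | [] => b
  | i :: rest =>
    if PySem.Int.band (b >>> (i - 1)) 1 = 0 ∧ PySem.Int.band (b >>> i) 1 = 1 then
      PySem.Int.bor (PySem.Int.band b (Int.not ((1 : Int) <<< i))) ((1 : Int) <<< (i - 1))
    else pvLoopDown b rest

def find_closed_numbers (num : Int) : Int × Int :=
  (pvLoopUp num (List.range' 1 31), pvLoopDown num (List.range' 1 31))

-- ===== PORT B =====
def find_closed_numbers_alt (num : Int) : Int × Int :=
  let t := PySem.Int.band (PySem.Int.band num (Int.not (num >>> (1 : Nat)))) 0x7FFFFFFF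
  let low := PySem.Int.band t (-t)
  let s := PySem.Int.band (PySem.Int.band (Int.not num) (num >>> (1 : Nat))) 0x7FFFFFFF
  let low2 := PySem.Int.band s (-s)
  (num + low, num - low2)

-- ===== PRECONDITION & SPEC =====
def Spec_find_closed_numbers (num : Int) (out : Int × Int) : Prop := out = find_closed_numbers_alt num
instance (num : Int) (out : Int × Int) : Decidable (Spec_find_closed_numbers num out) := by unfold Spec_find_closed_numbers; infer_instance

-- ===== CLAIM (what is proved, stated in full; the proofs are below) =====
def Claim_equal_find_closed_numbers : Prop := ∀ (num : Int), Dom_find_closed_numbers num → Spec_find_closed_numbers num (find_closed_numbers num)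

-- ===== LEMMAS AND PROOFS =====

-- Nat: ldiff and land split every number
theorem pv_ldiff_add_land (m n : Nat) : m.ldiff n + (m &&& n) = m := by
  induction m using Nat.binaryRec generalizing n with
  | zero => simp [Nat.ldiff]
  | bit a m ih =>
    induction n using Nat.bitCasesOn with
    | _ b n =>
      rw [Nat.ldiff_bit, Nat.land_bit]
      have := ih n
      simp only [Nat.bit_val]
      cases a <;> cases b <;> simp <;> omega

theorem pv_sub_land (m n : Nat) : m - (m &&& n) = m.ldiff n := by
  have := pv_ldiff_add_land m n; omega

-- bridges: PySem's Python-exact bitwise operators are Mathlib's land/lor/lnot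
theorem pv_not_eq_lnot (a : Int) : Int.not a = Int.lnot a := by cases a <;> rfl

theorem pv_band_eq_land (a b : Int) : PySem.Int.band a b = Int.land a b := by
  have h : ∀ k : Nat, ¬((k : Int) ≤ -1) := by intro k; omega
  cases a with
  | ofNat m => cases b with
    | ofNat n => simp [PySem.Int.band, Int.land]
    | negSucc n => simp [PySem.Int.band, Int.land, Int.negSucc_eq, h, pv_sub_land]
  | negSucc m => cases b with
    | ofNat n => simp [PySem.Int.band, Int.land, Int.negSucc_eq, h, pv_sub_land]
    | negSucc n => simp [PySem.Int.band, Int.land, Int.negSucc_eq, h]; ring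

theorem pv_bor_eq_lor (a b : Int) : PySem.Int.bor a b = Int.lor a b := by
  have h : ∀ k : Nat, ¬((k : Int) ≤ -1) := by intro k; omega
  cases a with
  | ofNat m => cases b with
    | ofNat n => simp [PySem.Int.bor, Int.lor]
    | negSucc n => simp [PySem.Int.bor, Int.lor, Int.negSucc_eq, h, pv_sub_land]; ring
  | negSucc m => cases b with
    | ofNat n => simp [PySem.Int.bor, Int.lor, Int.negSucc_eq, h, pv_sub_land]; ring
    | negSucc n => simp [PySem.Int.bor, Int.lor, Int.negSucc_eq, h]; ring

theorem pv_tb_shiftRight (a : Int) (k j : Nat) : (a >>> k).testBit j = a.testBit (k + j) := by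
  cases a with
  | ofNat m =>
    show (Int.ofNat (m >>> k)).testBit j = _
    show (m >>> k).testBit j = m.testBit (k + j)
    exact Nat.testBit_shiftRight m
  | negSucc m =>
    show (Int.negSucc (m >>> k)).testBit j = _
    show (!(m >>> k).testBit j) = !(m.testBit (k + j))
    rw [Nat.testBit_shiftRight]

theorem pv_pow_cast (i : Nat) : ((2 : Int) ^ i) = ((2 ^ i : Nat) : Int) := by push_cast; rfl

theorem pv_shl_one (i : Nat) : (1 : Int) <<< i = (2 : Int) ^ i := by
  show Int.ofNat (1 <<< i) = _
  rw [pv_pow_cast, Nat.one_shiftLeft]; rfl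

theorem pv_tb_pow (i j : Nat) : ((2 : Int) ^ i).testBit j = decide (i = j) := by
  rw [pv_pow_cast]
  show (2 ^ i : Nat).testBit j = _
  simp [Nat.testBit_two_pow]

-- testBit through Euclidean div/mod
theorem pv_tb_emod (a : Int) (j : Nat) : a.testBit j = decide (a / 2 ^ j % 2 = 1) := by
  cases a with
  | ofNat m =>
    show m.testBit j = _
    rw [Nat.testBit_eq_decide_div_mod_eq]
    have h : ((m : Int)) / 2 ^ j % 2 = ((m / 2 ^ j % 2 : Nat) : Int) := by push_cast; rfl
    rw [show (Int.ofNat m : Int) = (m : Int) from rfl, h]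
    simp only [decide_eq_decide]
    omega
  | negSucc m =>
    show (!m.testBit j) = _
    rw [Nat.testBit_eq_decide_div_mod_eq]
    have h2 : (0:Int) < 2 ^ j := by positivity
    have hcast : ((m : Int)) / 2 ^ j = ((m / 2 ^ j : Nat) : Int) := by push_cast; rfl
    set q : Int := (m : Int) / 2 ^ j with hq
    have hr : 0 ≤ (m:Int) % 2^j ∧ (m:Int) % 2^j < 2^j :=
      ⟨Int.emod_nonneg _ (by positivity), Int.emod_lt_of_pos _ h2⟩
    have hm : q * 2^j + (m:Int) % 2^j = (m:Int) := by
      rw [hq, mul_comm]; exact Int.mul_ediv_add_emod _ _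
    have hdiv : (Int.negSucc m) / 2 ^ j = -q - 1 := by
      rw [Int.negSucc_eq, show -((m:Int)+1) = (2^j - 1 - (m:Int) % 2^j) + (-q-1) * 2^j by linear_combination hm,
          Int.add_mul_ediv_right _ _ (by positivity : (2:Int)^j ≠ 0),
          Int.ediv_eq_zero_of_lt (by omega) (by omega)]
      ring
    rw [hdiv]
    rw [hcast] at hq
    by_cases hb : m / 2 ^ j % 2 = 1 <;> simp [hb] <;> omega

-- two integers with the same bits are equal
theorem pv_tb_ext {a b : Int} (h : ∀ j, a.testBit j = b.testBit j) : a = b := by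
  cases a with
  | ofNat m => cases b with
    | ofNat n => exact congrArg Int.ofNat (Nat.eq_of_testBit_eq h)
    | negSucc n =>
      exfalso
      have hj := h (m + n)
      have hm : m < 2 ^ (m + n) := lt_of_le_of_lt (Nat.le_add_right m n) Nat.lt_two_pow_self
      have hn : n < 2 ^ (m + n) := lt_of_le_of_lt (Nat.le_add_left n m) Nat.lt_two_pow_self
      simp only [show (Int.ofNat m).testBit (m+n) = m.testBit (m+n) from rfl,
        show (Int.negSucc n).testBit (m+n) = !(n.testBit (m+n)) from rfl,
        Nat.testBit_eq_false_of_lt hm, Nat.testBit_eq_false_of_lt hn] at hj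
      simp at hj
  | negSucc m => cases b with
    | ofNat n =>
      exfalso
      have hj := h (m + n)
      have hm : m < 2 ^ (m + n) := lt_of_le_of_lt (Nat.le_add_right m n) Nat.lt_two_pow_self
      have hn : n < 2 ^ (m + n) := lt_of_le_of_lt (Nat.le_add_left n m) Nat.lt_two_pow_self
      simp only [show (Int.negSucc m).testBit (m+n) = !(m.testBit (m+n)) from rfl,
        show (Int.ofNat n).testBit (m+n) = n.testBit (m+n) from rfl,
        Nat.testBit_eq_false_of_lt hm, Nat.testBit_eq_false_of_lt hn] at hj
      simp at hj
    | negSucc n =>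
      have : m = n := Nat.eq_of_testBit_eq (fun j => by
        have := h j
        simpa [show (Int.negSucc m).testBit j = !(m.testBit j) from rfl,
               show (Int.negSucc n).testBit j = !(n.testBit j) from rfl] using this)
      rw [this]

theorem pv_tb_zero (j : Nat) : (0 : Int).testBit j = false := by
  show (0:Nat).testBit j = false; simp

theorem pv_zero_of_tb {t : Int} (h : ∀ j, t.testBit j = false) : t = 0 :=
  pv_tb_ext (fun j => by rw [h j, pv_tb_zero])

-- bits of a + 2^i
theorem pv_div_pow_add (a : Int) {i j : Nat} (h : j ≤ i) :
    (a + 2 ^ i) / 2 ^ j = a / 2 ^ j + 2 ^ (i - j) := by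
  rw [show (2:Int)^i = 2^(i-j) * 2^j by rw [← pow_add]; congr 1; omega]
  exact Int.add_mul_ediv_right _ _ (by positivity)

theorem pv_tb_add_pow_lt {a : Int} {i j : Nat} (h : j < i) :
    (a + 2 ^ i).testBit j = a.testBit j := by
  rw [pv_tb_emod, pv_tb_emod, pv_div_pow_add a (le_of_lt h)]
  have h2 : (2:Int) ^ (i - j) = 2 * 2 ^ (i - j - 1) := by
    rw [← pow_succ']; congr 1; omega
  simp only [decide_eq_decide]
  omega

theorem pv_tb_add_pow_self (a : Int) (i : Nat) : (a + 2 ^ i).testBit i = !a.testBit i := by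
  rw [pv_tb_emod, pv_tb_emod, pv_div_pow_add a (le_refl i)]
  simp only [Nat.sub_self, pow_zero]
  by_cases hb : a / 2 ^ i % 2 = 1 <;> simp [hb] <;> omega

theorem pv_tb_add_pow_gt {a : Int} {i j : Nat} (hbit : a.testBit i = false) (h : i < j) :
    (a + 2 ^ i).testBit j = a.testBit j := by
  have h2j : (0:Int) < 2 ^ j := by positivity
  have h2i : (0:Int) < 2 ^ i := by positivity
  set q : Int := a / 2 ^ j with hq
  set r : Int := a % 2 ^ j with hr
  have hqr : q * 2 ^ j + r = a := by rw [hq, hr, mul_comm]; exact Int.mul_ediv_add_emod _ _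
  have hrb : 0 ≤ r ∧ r < 2 ^ j := ⟨Int.emod_nonneg _ (by positivity), Int.emod_lt_of_pos _ h2j⟩
  set u : Int := r / 2 ^ i with hu
  set v : Int := r % 2 ^ i with hv
  have huv : u * 2 ^ i + v = r := by rw [hu, hv, mul_comm]; exact Int.mul_ediv_add_emod _ _
  have hvb : 0 ≤ v ∧ v < 2 ^ i := ⟨Int.emod_nonneg _ (by positivity), Int.emod_lt_of_pos _ h2i⟩
  have hsplit : (2:Int) ^ j = 2 ^ (j - i) * 2 ^ i := by rw [← pow_add]; congr 1; omega
  have hai : a / 2 ^ i = u + q * 2 ^ (j - i) := by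
    rw [show a = r + q * 2 ^ (j - i) * 2 ^ i by rw [mul_assoc, ← hsplit]; omega,
        Int.add_mul_ediv_right _ _ (by positivity : (2:Int)^i ≠ 0), ← hu]
  have heven : (2:Int) ^ (j - i) = 2 * 2 ^ (j - i - 1) := by rw [← pow_succ']; congr 1; omega
  have hueven : u % 2 = 0 := by
    rw [pv_tb_emod, hai] at hbit
    have : q * 2 ^ (j - i) = 2 * (q * 2 ^ (j - i - 1)) := by rw [heven]; ring
    simp only [decide_eq_false_iff_not] at hbit
    omega
  have hult : u < 2 ^ (j - i) := by
    rcases lt_or_ge u (2 ^ (j - i)) with h' | h'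
    · exact h'
    · exfalso
      have : 2 ^ (j - i) * 2 ^ i ≤ u * 2 ^ i := mul_le_mul_of_nonneg_right h' (le_of_lt h2i)
      rw [← hsplit] at this; omega
  have hu2 : u + 2 ≤ 2 ^ (j - i) := by omega
  have hru : r + 2 ^ i < 2 ^ j := by
    have h1 : (u + 2) * 2 ^ i ≤ 2 ^ (j - i) * 2 ^ i := mul_le_mul_of_nonneg_right hu2 (le_of_lt h2i)
    rw [← hsplit] at h1
    have h3 : (u + 2) * 2 ^ i = u * 2 ^ i + 2 ^ i + 2 ^ i := by ring
    omega
  have hdiv : (a + 2 ^ i) / 2 ^ j = q := by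
    rw [show a + 2 ^ i = (r + 2 ^ i) + q * 2 ^ j by omega,
        Int.add_mul_ediv_right _ _ (by positivity : (2:Int)^j ≠ 0),
        Int.ediv_eq_zero_of_lt (by omega) hru]
    ring
  rw [pv_tb_emod, pv_tb_emod, hdiv, ← hq]

-- setting a clear bit adds 2^i, clearing a set bit subtracts it
theorem pv_lor_pow {a : Int} {i : Nat} (h : a.testBit i = false) : Int.lor a (2 ^ i) = a + 2 ^ i := by
  apply pv_tb_ext
  intro j
  rw [Int.testBit_lor, pv_tb_pow]
  rcases lt_trichotomy j i with hj | hj | hj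
  · rw [pv_tb_add_pow_lt hj]; simp [Nat.ne_of_gt hj]
  · subst hj; rw [pv_tb_add_pow_self, h]; simp
  · rw [pv_tb_add_pow_gt h hj]; simp [Nat.ne_of_lt hj]

theorem pv_land_not_pow {a : Int} {i : Nat} (h : a.testBit i = true) :
    Int.land a (Int.lnot (2 ^ i)) = a - 2 ^ i := by
  have hb : (a - 2 ^ i).testBit i = false := by
    have := pv_tb_add_pow_self (a - 2 ^ i) i
    rw [show a - 2 ^ i + 2 ^ i = a by ring, h] at this
    cases hx : (a - 2 ^ i).testBit i
    · rfl
    · rw [hx] at this; simp at this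
  apply pv_tb_ext
  intro j
  rw [Int.testBit_land, Int.testBit_lnot, pv_tb_pow]
  have hsub : ∀ k, a.testBit k = ((a - 2^i) + 2^i).testBit k := by
    intro k; rw [show a - 2^i + 2^i = a by ring]
  rcases lt_trichotomy j i with hj | hj | hj
  · rw [hsub j, pv_tb_add_pow_lt hj]; simp [Nat.ne_of_gt hj]
  · subst hj; rw [hb]; simp
  · rw [hsub j, pv_tb_add_pow_gt hb hj]; simp [Nat.ne_of_lt hj]

-- x & 1 reads bit 0: the loop conditions test single bits
theorem pv_land_one (x : Int) : Int.land x 1 = if x.testBit 0 then 1 else 0 := by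
  cases x with
  | ofNat m =>
    show ((m &&& 1 : Nat) : Int) = if m.testBit 0 then 1 else 0
    have h1 : m &&& 1 = m % 2 := Nat.and_one_is_mod m
    rw [Nat.testBit_zero, h1]
    by_cases hb : m % 2 = 1 <;> simp [hb]
    omega
  | negSucc m =>
    show ((Nat.ldiff 1 m : Nat) : Int) = if !(m.testBit 0) then 1 else 0
    have : Nat.ldiff 1 m = if m.testBit 0 then 0 else 1 := by
      apply Nat.eq_of_testBit_eq
      intro j
      rw [Nat.testBit_ldiff]
      cases j with
      | zero =>
        rw [show Nat.testBit 1 0 = true from rfl]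
        cases hm : m.testBit 0 <;> simp
      | succ k =>
        rw [show Nat.testBit 1 (k+1) = false from by simp [Nat.testBit_succ]]
        cases hm : m.testBit 0 <;> simp [Nat.testBit_succ]
    rw [this]
    cases hm : m.testBit 0 <;> simp

theorem pv_cond_one (a : Int) (k : Nat) :
    (PySem.Int.band (a >>> k) 1 = 1 ↔ a.testBit k = true) := by
  rw [pv_band_eq_land, pv_land_one]
  have h := pv_tb_shiftRight a k 0
  rw [Nat.add_zero] at h
  rw [h]
  cases hb : a.testBit k <;> simp

theorem pv_cond_zero (a : Int) (k : Nat) :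
    (PySem.Int.band (a >>> k) 1 = 0 ↔ a.testBit k = false) := by
  rw [pv_band_eq_land, pv_land_one]
  have h := pv_tb_shiftRight a k 0
  rw [Nat.add_zero] at h
  rw [h]
  cases hb : a.testBit k <;> simp

-- lowest set bit: t & -t isolates 2^p
theorem pv_low_zero_dvd {n : Nat} (p : Nat) (h : ∀ j, j < p → n.testBit j = false) : 2 ^ p ∣ n := by
  induction p with
  | zero => simp
  | succ q ih =>
    obtain ⟨u, hu⟩ := ih (fun j hj => h j (Nat.lt_succ_of_lt hj))
    have hq : n.testBit q = false := h q (Nat.lt_succ_self q)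
    rw [hu, Nat.testBit_two_pow_mul] at hq
    simp only [ge_iff_le, le_refl, decide_true, Bool.true_and, Nat.sub_self] at hq
    have : u % 2 = 0 := by rw [Nat.testBit_zero] at hq; simp at hq; omega
    obtain ⟨v, hv⟩ := Nat.dvd_of_mod_eq_zero this
    exact ⟨v, by rw [hu, hv, pow_succ]; ring⟩

theorem pv_ldiff_pred {n p : Nat} (h1 : n.testBit p = true) (h0 : ∀ j, j < p → n.testBit j = false) :
    n.ldiff (n - 1) = 2 ^ p := by
  obtain ⟨u, hu⟩ := pv_low_zero_dvd p h0
  have hodd : u % 2 = 1 := by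
    rw [hu, Nat.testBit_two_pow_mul] at h1
    simp only [ge_iff_le, le_refl, decide_true, Bool.true_and, Nat.sub_self] at h1
    rw [Nat.testBit_zero] at h1; simpa using h1
  obtain ⟨v, hv⟩ : ∃ v, u = 2 * v + 1 := ⟨u / 2, by omega⟩
  have hp : 0 < 2 ^ p := Nat.two_pow_pos p
  have hpred : n - 1 = 2 ^ p * (2 * v) + (2 ^ p - 1) := by
    rw [hu, hv]; ring_nf; omega
  have h2v1 : ∀ k, 1 ≤ k → (2 * v + 1).testBit k = (2 * v).testBit k := by
    intro k hk
    obtain ⟨k', rfl⟩ : ∃ k', k = k' + 1 := ⟨k - 1, by omega⟩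
    rw [Nat.testBit_succ, Nat.testBit_succ]
    congr 1
    omega
  apply Nat.eq_of_testBit_eq
  intro j
  rw [Nat.testBit_ldiff, hpred, Nat.testBit_two_pow_mul_add _ (by omega),
      Nat.testBit_two_pow, hu, hv, Nat.testBit_two_pow_mul]
  rcases lt_trichotomy j p with hj | hj | hj
  · simp [hj, Nat.ne_of_gt hj, Nat.testBit_two_pow_sub_one]
  · subst hj
    simp [Nat.testBit_zero]
  · have h1le : ¬ (j < p) := by omega
    have hge : p ≤ j := by omega
    have hk : 1 ≤ j - p := by omega
    simp only [h1le, if_false, hge, decide_true, Bool.true_and]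
    rw [h2v1 _ hk]
    simp [Nat.ne_of_lt hj]

theorem pv_lowbit {t : Int} {p : Nat} (h0 : 0 ≤ t) (h1 : t.testBit p = true)
    (hlow : ∀ j, j < p → t.testBit j = false) : Int.land t (-t) = (2 : Int) ^ p := by
  obtain ⟨n, rfl⟩ : ∃ n : Nat, t = Int.ofNat n := ⟨t.toNat, by exact_mod_cast (Int.toNat_of_nonneg h0).symm⟩
  have hn0 : n ≠ 0 := by
    rintro rfl
    rw [show (Int.ofNat 0).testBit p = (0:Nat).testBit p from rfl] at h1
    simp at h1
  obtain ⟨k, rfl⟩ : ∃ k, n = k + 1 := ⟨n - 1, by omega⟩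
  have hneg : -(Int.ofNat (k+1)) = Int.negSucc k := by
    show -((((k+1):Nat)):Int) = _; rw [Int.negSucc_eq]; push_cast; ring
  rw [hneg]
  show ((Nat.ldiff (k+1) k : Nat) : Int) = _
  have : Nat.ldiff (k+1) k = 2 ^ p := by
    have := pv_ldiff_pred (n := k+1) (p := p) h1 hlow
    simpa using this
  rw [this]; push_cast; rfl

-- the '01' / '10' adjacent-pair position masks and their bits
def pvT (num : Int) : Int := Int.land (Int.land num (Int.lnot (num >>> (1 : Nat)))) 0x7FFFFFFF
def pvS (num : Int) : Int := Int.land (Int.land (Int.lnot num) (num >>> (1 : Nat))) 0x7FFFFFFF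

theorem pv_tb_mask (j : Nat) : (0x7FFFFFFF : Int).testBit j = decide (j < 31) := by
  show ((0x7FFFFFFF : Nat) : Int).testBit j = _
  show (0x7FFFFFFF : Nat).testBit j = _
  rw [show (0x7FFFFFFF : Nat) = 2 ^ 31 - 1 by norm_num, Nat.testBit_two_pow_sub_one]

theorem pvT_bits (num : Int) (p : Nat) :
    (pvT num).testBit p = (num.testBit p && !num.testBit (p + 1) && decide (p < 31)) := by
  unfold pvT
  rw [Int.testBit_land, Int.testBit_land, Int.testBit_lnot, pv_tb_shiftRight, pv_tb_mask,
      Nat.add_comm 1 p]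

theorem pvS_bits (num : Int) (p : Nat) :
    (pvS num).testBit p = (!num.testBit p && num.testBit (p + 1) && decide (p < 31)) := by
  unfold pvS
  rw [Int.testBit_land, Int.testBit_land, Int.testBit_lnot, pv_tb_shiftRight, pv_tb_mask,
      Nat.add_comm 1 p]

theorem pvT_nonneg (num : Int) : 0 ≤ pvT num := by
  cases h : pvT num with
  | ofNat m => exact Int.natCast_nonneg m
  | negSucc m =>
    exfalso
    have hb := pvT_bits num (31 + m)
    rw [h] at hb
    have hm : m.testBit (31 + m) = false :=
      Nat.testBit_eq_false_of_lt (lt_of_lt_of_le Nat.lt_two_pow_self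
        (Nat.pow_le_pow_right (by norm_num) (by omega)))
    rw [show (Int.negSucc m).testBit (31+m) = !(m.testBit (31+m)) from rfl, hm] at hb
    simp at hb

theorem pvS_nonneg (num : Int) : 0 ≤ pvS num := by
  cases h : pvS num with
  | ofNat m => exact Int.natCast_nonneg m
  | negSucc m =>
    exfalso
    have hb := pvS_bits num (31 + m)
    rw [h] at hb
    have hm : m.testBit (31 + m) = false :=
      Nat.testBit_eq_false_of_lt (lt_of_lt_of_le Nat.lt_two_pow_self
        (Nat.pow_le_pow_right (by norm_num) (by omega)))
    rw [show (Int.negSucc m).testBit (31+m) = !(m.testBit (31+m)) from rfl, hm] at hb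
    simp at hb

-- A's first loop computes num + lowbit(pvT num)
theorem pvLoopUp_inv (num : Int) : ∀ (c i : Nat), i + c = 32 → 1 ≤ i →
    (∀ j, j + 1 < i → (pvT num).testBit j = false) →
    pvLoopUp num (List.range' i c) = num + Int.land (pvT num) (-(pvT num)) := by
  intro c
  induction c with
  | zero =>
    intro i hi h1 hbits
    have hT : pvT num = 0 := pv_zero_of_tb (fun j => by
      by_cases hj : j < 31
      · exact hbits j (by omega)
      · rw [pvT_bits]; simp [hj])
    rw [hT, show List.range' i 0 = [] from rfl]
    show num = num + Int.land 0 (-0)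
    rw [show Int.land 0 (-0) = 0 from by decide, add_zero]
  | succ c ih =>
    intro i hi h1 hbits
    rw [List.range'_succ]
    have hpow : (2:Int)^i = 2*2^(i-1) := by rw [← pow_succ']; congr 1; omega
    by_cases hc : PySem.Int.band (num >>> (i-1)) 1 = 1 ∧ PySem.Int.band (num >>> i) 1 = 0
    · obtain ⟨hc1, hc0⟩ := hc
      rw [show pvLoopUp num (i :: List.range' (i+1) c) =
            PySem.Int.band (PySem.Int.bor num ((1 : Int) <<< i)) (Int.not ((1 : Int) <<< (i - 1)))
          from by rw [pvLoopUp]; rw [if_pos ⟨hc1, hc0⟩]]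
      rw [pv_cond_one] at hc1
      rw [pv_cond_zero] at hc0
      have hTbit : (pvT num).testBit (i-1) = true := by
        rw [pvT_bits, show i - 1 + 1 = i by omega, hc1, hc0]
        simp
        omega
      have hlow := pv_lowbit (pvT_nonneg num) hTbit (fun j hj => hbits j (by omega))
      rw [hlow, pv_band_eq_land, pv_bor_eq_lor, pv_not_eq_lnot, pv_shl_one, pv_shl_one,
          pv_lor_pow hc0]
      have hb1 : (num + 2^i).testBit (i-1) = true := by
        rw [pv_tb_add_pow_lt (by omega), hc1]
      rw [pv_land_not_pow hb1]
      omega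
    · rw [show pvLoopUp num (i :: List.range' (i+1) c) = pvLoopUp num (List.range' (i+1) c)
          from by rw [pvLoopUp]; rw [if_neg hc]]
      apply ih (i+1) (by omega) (by omega)
      intro j hj
      rcases Nat.lt_or_ge (j+1) i with hji | hji
      · exact hbits j hji
      · have hje : j = i - 1 := by omega
        subst hje
        rw [pvT_bits, show i - 1 + 1 = i by omega]
        by_cases hA : num.testBit (i-1) = true
        · by_cases hB : num.testBit i = false
          · exact absurd ⟨(pv_cond_one num (i-1)).mpr hA, (pv_cond_zero num i).mpr hB⟩ hc
          · simp only [Bool.not_eq_false] at hB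
            rw [hB]
            simp
        · simp only [Bool.not_eq_true] at hA
          rw [hA]
          simp

-- A's second loop computes num - lowbit(pvS num)
theorem pvLoopDown_inv (num : Int) : ∀ (c i : Nat), i + c = 32 → 1 ≤ i →
    (∀ j, j + 1 < i → (pvS num).testBit j = false) →
    pvLoopDown num (List.range' i c) = num - Int.land (pvS num) (-(pvS num)) := by
  intro c
  induction c with
  | zero =>
    intro i hi h1 hbits
    have hS : pvS num = 0 := pv_zero_of_tb (fun j => by
      by_cases hj : j < 31
      · exact hbits j (by omega)
      · rw [pvS_bits]; simp [hj])
    rw [hS, show List.range' i 0 = [] from rfl]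
    show num = num - Int.land 0 (-0)
    rw [show Int.land 0 (-0) = 0 from by decide, sub_zero]
  | succ c ih =>
    intro i hi h1 hbits
    rw [List.range'_succ]
    have hpow : (2:Int)^i = 2*2^(i-1) := by rw [← pow_succ']; congr 1; omega
    by_cases hc : PySem.Int.band (num >>> (i-1)) 1 = 0 ∧ PySem.Int.band (num >>> i) 1 = 1
    · obtain ⟨hc0, hc1⟩ := hc
      rw [show pvLoopDown num (i :: List.range' (i+1) c) =
            PySem.Int.bor (PySem.Int.band num (Int.not ((1 : Int) <<< i))) ((1 : Int) <<< (i - 1))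
          from by rw [pvLoopDown]; rw [if_pos ⟨hc0, hc1⟩]]
      rw [pv_cond_zero] at hc0
      rw [pv_cond_one] at hc1
      have hSbit : (pvS num).testBit (i-1) = true := by
        rw [pvS_bits, show i - 1 + 1 = i by omega, hc1, hc0]
        simp
        omega
      have hlow := pv_lowbit (pvS_nonneg num) hSbit (fun j hj => hbits j (by omega))
      rw [hlow, pv_bor_eq_lor, pv_band_eq_land, pv_not_eq_lnot, pv_shl_one, pv_shl_one,
          pv_land_not_pow hc1]
      have hb0 : (num - 2^i).testBit (i-1) = false := by
        have h := pv_tb_add_pow_lt (a := num - 2^i) (i := i) (j := i - 1) (by omega)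
        rw [show num - 2^i + 2^i = num by ring] at h
        rw [← h]
        exact hc0
      rw [pv_lor_pow hb0]
      omega
    · rw [show pvLoopDown num (i :: List.range' (i+1) c) = pvLoopDown num (List.range' (i+1) c)
          from by rw [pvLoopDown]; rw [if_neg hc]]
      apply ih (i+1) (by omega) (by omega)
      intro j hj
      rcases Nat.lt_or_ge (j+1) i with hji | hji
      · exact hbits j hji
      · have hje : j = i - 1 := by omega
        subst hje
        rw [pvS_bits, show i - 1 + 1 = i by omega]
        by_cases hA : num.testBit (i-1) = false
        · by_cases hB : num.testBit i = true
          · exact absurd ⟨(pv_cond_zero num (i-1)).mpr hA, (pv_cond_one num i).mpr hB⟩ hc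
          · simp only [Bool.not_eq_true] at hB
            rw [hB]
            simp
        · simp only [Bool.not_eq_false] at hA
          rw [hA]
          simp

-- ===== VERDICT (by name: the statement is the Claim_ definition above) =====
theorem find_closed_numbers_spec : Claim_equal_find_closed_numbers := by
  intro num _
  unfold Spec_find_closed_numbers
  show find_closed_numbers num = find_closed_numbers_alt num
  unfold find_closed_numbers find_closed_numbers_alt
  rw [pvLoopUp_inv num 31 1 rfl (le_refl 1) (fun j hj => absurd hj (by omega)),
      pvLoopDown_inv num 31 1 rfl (le_refl 1) (fun j hj => absurd hj (by omega))]
  simp only [pv_band_eq_land, pv_not_eq_lnot]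
  rfl
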